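-- pv_equiv track=rewrite | github.com/dolithachowdary/leetcode-practice | 3531-count-covered-buildings/3531-count-covered-buildings.py | countCoveredBuildings
-- ===== SOURCE A (Python) =====
-- from typing import List
-- import math
-- from collections import defaultdict
--
-- def countCoveredBuildings(n: int, buildings: List[List[int]]) -> int:
--     # Use dicts since coordinates can be very large (up to 1e9)
--     row_min = defaultdict(lambda: math.inf)
--     row_max = defaultdict(lambda: -math.inf)
--     col_min = defaultdict(lambda: math.inf)
--     col_max = defaultdict(lambda: -math.inf)
--
--     # First pass: compute min/max for each row and column
--     for r, c in buildings:
--         row_min[r] = min(row_min[r], c)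
--         row_max[r] = max(row_max[r], c)
--         col_min[c] = min(col_min[c], r)
--         col_max[c] = max(col_max[c], r)
--
--     # Second pass: count covered buildings
--     covered = 0
--     for r, c in buildings:
--         if row_min[r] < c < row_max[r] and col_min[c] < r < col_max[c]:
--             covered += 1
--
--     return covered
-- ===== SOURCE B (Python) =====
-- from typing import List
--
-- def countCoveredBuildings(n: int, buildings: List[List[int]]) -> int:
--     # Brute force: a building is covered iff some other building lies strictly
--     # left, right, above and below it in its row/column.
--     def covered(r, c):
--         left = right = up = down = False
--         for r2, c2 in buildings:
--             if r2 == r: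
--                 if c2 < c:
--                     left = True
--                 elif c2 > c:
--                     right = True
--             if c2 == c:
--                 if r2 < r:
--                     up = True
--                 elif r2 > r:
--                     down = True
--         return left and right and up and down
--     return sum(1 for r, c in buildings if covered(r, c))
-- ===== Notes on version B (the rewrite author's own statement) =====
-- stated objective: alternative
-- what changed: Replaces A's two-pass defaultdict min/max construction with a direct per-building brute-force scan that checks for a strictly smaller and strictly larger neighbour in the same row and column.
import Mathlib
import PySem

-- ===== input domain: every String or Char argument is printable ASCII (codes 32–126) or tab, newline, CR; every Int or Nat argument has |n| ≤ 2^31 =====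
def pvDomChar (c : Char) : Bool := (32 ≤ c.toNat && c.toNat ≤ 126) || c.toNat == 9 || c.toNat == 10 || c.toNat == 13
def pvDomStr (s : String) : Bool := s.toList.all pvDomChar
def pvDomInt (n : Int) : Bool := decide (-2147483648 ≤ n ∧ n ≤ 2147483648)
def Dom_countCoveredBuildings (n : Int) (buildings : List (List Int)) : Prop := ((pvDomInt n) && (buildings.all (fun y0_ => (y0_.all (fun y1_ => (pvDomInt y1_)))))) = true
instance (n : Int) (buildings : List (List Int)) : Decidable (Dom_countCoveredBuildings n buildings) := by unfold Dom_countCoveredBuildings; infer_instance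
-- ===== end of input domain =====

-- B replaces A's four min/max hash maps by a direct per-building existence scan
-- (strictly smaller / larger neighbour in the same row and column); objective: alternative.

-- ===== PORT A =====
-- defaultdict(lambda: inf) with 'min(row_min[r], c)': the value stored on first touch is
-- min(inf, c) = c, afterwards min(old, c); ported exactly via Option on the stored Int.
-- In the second pass every looked-up key is present, matched via Option (none ↔ inf/-inf,
-- where 'inf < c' / 'c < -inf' is False).
def pvMinUpd (d : PySem.Dict Int Int) (k v : Int) : PySem.Dict Int Int :=
  d.insert k (match d.get? k with | none => v | some x => min x v)

def pvMaxUpd (d : PySem.Dict Int Int) (k v : Int) : PySem.Dict Int Int :=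
  d.insert k (match d.get? k with | none => v | some x => max x v)

def pvLtGet (d : PySem.Dict Int Int) (k v : Int) : Bool :=
  match d.get? k with | none => false | some x => decide (x < v)

def pvGtGet (d : PySem.Dict Int Int) (k v : Int) : Bool :=
  match d.get? k with | none => false | some x => decide (v < x)

def countCoveredBuildings (n : Int) (buildings : List (List Int)) : Int :=
  -- first pass: compute min/max for each row and column
  let st := buildings.foldl
    (fun (st : PySem.Dict Int Int × PySem.Dict Int Int × PySem.Dict Int Int × PySem.Dict Int Int) b =>
      match b with
      | [r, c] => (pvMinUpd st.1 r c, pvMaxUpd st.2.1 r c, pvMinUpd st.2.2.1 c r, pvMaxUpd st.2.2.2 c r)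
      | _ => st)  -- unpacking 'r, c' raises in Python unless len(b) = 2; excluded by Pre_
    (PySem.Dict.empty, PySem.Dict.empty, PySem.Dict.empty, PySem.Dict.empty)
  -- second pass: count covered buildings
  buildings.foldl
    (fun covered b =>
      match b with
      | [r, c] =>
          if pvLtGet st.1 r c && pvGtGet st.2.1 r c && pvLtGet st.2.2.1 c r && pvGtGet st.2.2.2 c r
          then covered + 1 else covered
      | _ => covered)
    0

-- ===== PORT B =====
-- flags (left, right, up, down) accumulated over one scan of buildings; loop body as a helper
def pvStepB (r c : Int) (fl : Bool × Bool × Bool × Bool) (b : List Int) : Bool × Bool × Bool × Bool :=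
  match b with
  | r2 :: bt =>
      match bt with
      | c2 :: bt2 =>
          match bt2 with
          | [] =>
              let fl := if r2 == r then (if c2 < c then (true, fl.2) else if c2 > c then (fl.1, true, fl.2.2) else fl) else fl
              if c2 == c then (if r2 < r then (fl.1, fl.2.1, true, fl.2.2.2) else if r2 > r then (fl.1, fl.2.1, fl.2.2.1, true) else fl) else fl
          | _ :: _ => fl
      | [] => fl
  | [] => fl

def pvCovered (buildings : List (List Int)) (r c : Int) : Bool :=
  let fl := buildings.foldl (pvStepB r c) (false, false, false, false)
  fl.1 && fl.2.1 && fl.2.2.1 && fl.2.2.2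

def countCoveredBuildings_alt (n : Int) (buildings : List (List Int)) : Int :=
  buildings.foldl
    (fun acc b =>
      match b with
      | r :: bt =>
          match bt with
          | c :: bt2 =>
              match bt2 with
              | [] => if pvCovered buildings r c then acc + 1 else acc
              | _ :: _ => acc
          | [] => acc
      | [] => acc)
    0

-- ===== PRECONDITION & SPEC =====
-- Pre_ excludes inputs containing a building list whose length is not 2, on which the
-- tuple unpacking 'for r, c in buildings' raises ValueError in both A and B.
def Pre_countCoveredBuildings (n : Int) (buildings : List (List Int)) : Prop :=
  ∀ b ∈ buildings, b.length = 2
instance (n : Int) (buildings : List (List Int)) : Decidable (Pre_countCoveredBuildings n buildings) := by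
  unfold Pre_countCoveredBuildings; infer_instance

def pvWitness_countCoveredBuildings : Int × List (List Int) :=
  (5, [[1, 2], [2, 2], [3, 2], [2, 1], [2, 3]])

def Spec_countCoveredBuildings (n : Int) (buildings : List (List Int)) (out : Int) : Prop := out = countCoveredBuildings_alt n buildings
instance (n : Int) (buildings : List (List Int)) (out : Int) : Decidable (Spec_countCoveredBuildings n buildings out) := by unfold Spec_countCoveredBuildings; infer_instance

-- ===== CLAIM (what is proved, stated in full; the proofs are below) =====
def Claim_equal_countCoveredBuildings : Prop := ∀ (n : Int) (buildings : List (List Int)), Dom_countCoveredBuildings n buildings → Pre_countCoveredBuildings n buildings → Spec_countCoveredBuildings n buildings (countCoveredBuildings n buildings)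

-- ===== LEMMAS AND PROOFS =====


-- proof-side helpers: the (row, col) pairs a length-2 entry contributes, plain and swapped
def pvPairOf : List Int → Option (Int × Int)
  | [r, c] => some (r, c)
  | _ => none

def pvPairOf' : List Int → Option (Int × Int)
  | [r, c] => some (c, r)
  | _ => none

def pvMinFold (ps : List (Int × Int)) (d : PySem.Dict Int Int) : PySem.Dict Int Int :=
  ps.foldl (fun d p => pvMinUpd d p.1 p.2) d

def pvMaxFold (ps : List (Int × Int)) (d : PySem.Dict Int Int) : PySem.Dict Int Int :=
  ps.foldl (fun d p => pvMaxUpd d p.1 p.2) d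

def pvVals (ps : List (Int × Int)) (k : Int) : List Int :=
  (ps.filter (fun p => p.1 == k)).map (·.2)

-- B's per-element flag conditions
def pvQ1 (r c : Int) : List Int → Bool
  | [r2, c2] => r2 == r && decide (c2 < c)
  | _ => false
def pvQ2 (r c : Int) : List Int → Bool
  | [r2, c2] => r2 == r && decide (c2 > c)
  | _ => false
def pvQ3 (r c : Int) : List Int → Bool
  | [r2, c2] => c2 == c && decide (r2 < r)
  | _ => false
def pvQ4 (r c : Int) : List Int → Bool
  | [r2, c2] => c2 == c && decide (r2 > r)
  | _ => false

theorem pvPairOf_eq_some {b : List Int} {p : Int × Int} :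
    pvPairOf b = some p ↔ b = [p.1, p.2] := by
  rcases b with _ | ⟨r, _ | ⟨c, _ | ⟨x, t⟩⟩⟩ <;> rcases p with ⟨pr, pc⟩ <;>
    simp [pvPairOf, and_comm]

theorem pvPairOf'_eq_some {b : List Int} {p : Int × Int} :
    pvPairOf' b = some p ↔ b = [p.2, p.1] := by
  rcases b with _ | ⟨r, _ | ⟨c, _ | ⟨x, t⟩⟩⟩ <;> rcases p with ⟨pr, pc⟩ <;>
    simp [pvPairOf', and_comm]

-- A's first pass splits into four independent single-dict folds over the extracted pairs
theorem pvPass1_eq (l : List (List Int)) :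
    ∀ d1 d2 d3 d4 : PySem.Dict Int Int,
    l.foldl
      (fun (st : PySem.Dict Int Int × PySem.Dict Int Int × PySem.Dict Int Int × PySem.Dict Int Int) b =>
        match b with
        | [r, c] => (pvMinUpd st.1 r c, pvMaxUpd st.2.1 r c, pvMinUpd st.2.2.1 c r, pvMaxUpd st.2.2.2 c r)
        | _ => st)
      (d1, d2, d3, d4)
    = (pvMinFold (l.filterMap pvPairOf) d1, pvMaxFold (l.filterMap pvPairOf) d2,
       pvMinFold (l.filterMap pvPairOf') d3, pvMaxFold (l.filterMap pvPairOf') d4) := by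
  induction l with
  | nil => intro d1 d2 d3 d4; rfl
  | cons b t ih =>
    intro d1 d2 d3 d4
    rcases b with _ | ⟨r, _ | ⟨c, _ | ⟨x, tl⟩⟩⟩ <;>
      simp [pvPairOf, pvPairOf', pvMinFold, pvMaxFold, ih]

theorem pvMinFold_get? (ps : List (Int × Int)) :
    ∀ (d : PySem.Dict Int Int) (k : Int),
    (pvMinFold ps d).get? k =
      match d.get? k, pvVals ps k with
      | none, [] => none
      | none, v :: vs => some (vs.foldl min v)
      | some a, vs => some (vs.foldl min a) := by
  induction ps with
  | nil => intro d k; cases h : d.get? k <;> simp [pvMinFold, pvVals, h]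
  | cons p t ih =>
    intro d k
    have hstep : pvMinFold (p :: t) d = pvMinFold t (pvMinUpd d p.1 p.2) := rfl
    rw [hstep, ih]
    by_cases hk : p.1 = k
    · have hins : (pvMinUpd d p.1 p.2).get? k =
          some (match d.get? k with | none => p.2 | some x => min x p.2) := by
        subst hk; simp [pvMinUpd, PySem.Dict.get?_insert_self]
      have hvals : pvVals (p :: t) k = p.2 :: pvVals t k := by
        simp [pvVals, hk]
      rw [hins, hvals]
      cases h : d.get? k <;> simp
    · have hins : (pvMinUpd d p.1 p.2).get? k = d.get? k := by
        exact PySem.Dict.get?_insert_of_ne _ _ (fun h => hk h.symm)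
      have hvals : pvVals (p :: t) k = pvVals t k := by
        simp [pvVals, hk]
      rw [hins, hvals]

theorem pvMaxFold_get? (ps : List (Int × Int)) :
    ∀ (d : PySem.Dict Int Int) (k : Int),
    (pvMaxFold ps d).get? k =
      match d.get? k, pvVals ps k with
      | none, [] => none
      | none, v :: vs => some (vs.foldl max v)
      | some a, vs => some (vs.foldl max a) := by
  induction ps with
  | nil => intro d k; cases h : d.get? k <;> simp [pvMaxFold, pvVals, h]
  | cons p t ih =>
    intro d k
    have hstep : pvMaxFold (p :: t) d = pvMaxFold t (pvMaxUpd d p.1 p.2) := rfl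
    rw [hstep, ih]
    by_cases hk : p.1 = k
    · have hins : (pvMaxUpd d p.1 p.2).get? k =
          some (match d.get? k with | none => p.2 | some x => max x p.2) := by
        subst hk; simp [pvMaxUpd, PySem.Dict.get?_insert_self]
      have hvals : pvVals (p :: t) k = p.2 :: pvVals t k := by
        simp [pvVals, hk]
      rw [hins, hvals]
      cases h : d.get? k <;> simp
    · have hins : (pvMaxUpd d p.1 p.2).get? k = d.get? k := by
        exact PySem.Dict.get?_insert_of_ne _ _ (fun h => hk h.symm)
      have hvals : pvVals (p :: t) k = pvVals t k := by
        simp [pvVals, hk]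
      rw [hins, hvals]

theorem pvMem_vals {ps : List (Int × Int)} {k x : Int} :
    x ∈ pvVals ps k ↔ (k, x) ∈ ps := by
  simp only [pvVals, List.mem_map, List.mem_filter]
  constructor
  · rintro ⟨p, ⟨hp, hk⟩, hx⟩
    have : p = (k, x) := by
      cases p; simp_all
    exact this ▸ hp
  · intro h; exact ⟨(k, x), ⟨h, by simp⟩, rfl⟩

theorem pvFoldlMin_lt {v0 c : Int} (vs : List Int) :
    (vs.foldl min v0 < c) ↔ (v0 < c ∨ ∃ x ∈ vs, x < c) := by
  constructor
  · intro h
    rcases PySem.List.foldl_min_mem vs v0 with hm | hm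
    · exact Or.inl (hm ▸ h)
    · exact Or.inr ⟨_, hm, h⟩
  · rintro (h | ⟨x, hx, h⟩)
    · exact lt_of_le_of_lt (PySem.List.foldl_min_le vs v0).1 h
    · exact lt_of_le_of_lt ((PySem.List.foldl_min_le vs v0).2 x hx) h

theorem pvFoldlMax_gt {v0 c : Int} (vs : List Int) :
    (c < vs.foldl max v0) ↔ (c < v0 ∨ ∃ x ∈ vs, c < x) := by
  constructor
  · intro h
    rcases PySem.List.foldl_max_mem vs v0 with hm | hm
    · exact Or.inl (hm ▸ h)
    · exact Or.inr ⟨_, hm, h⟩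
  · rintro (h | ⟨x, hx, h⟩)
    · exact lt_of_lt_of_le h (PySem.List.le_foldl_max vs v0).1
    · exact lt_of_lt_of_le h ((PySem.List.le_foldl_max vs v0).2 x hx)

theorem pvLtGet_minFold {ps : List (Int × Int)} {k c x0 : Int} (hmem : (k, x0) ∈ ps) :
    pvLtGet (pvMinFold ps PySem.Dict.empty) k c = true ↔ ∃ x, (k, x) ∈ ps ∧ x < c := by
  have hvals : x0 ∈ pvVals ps k := pvMem_vals.mpr hmem
  rw [pvLtGet, pvMinFold_get? ps PySem.Dict.empty k, PySem.Dict.get?_empty]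
  rcases h : pvVals ps k with _ | ⟨v, vs⟩
  · simp [h] at hvals
  · simp only [decide_eq_true_eq, pvFoldlMin_lt]
    constructor
    · rintro (hlt | ⟨x, hx, hlt⟩)
      · exact ⟨v, pvMem_vals.mp (h ▸ List.mem_cons_self ..), hlt⟩
      · exact ⟨x, pvMem_vals.mp (h ▸ List.mem_cons_of_mem _ hx), hlt⟩
    · rintro ⟨x, hx, hlt⟩
      have : x ∈ v :: vs := h ▸ pvMem_vals.mpr hx
      rcases this with _ | hmem'
      · exact Or.inl hlt
      · exact Or.inr ⟨x, by assumption, hlt⟩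

theorem pvGtGet_maxFold {ps : List (Int × Int)} {k c x0 : Int} (hmem : (k, x0) ∈ ps) :
    pvGtGet (pvMaxFold ps PySem.Dict.empty) k c = true ↔ ∃ x, (k, x) ∈ ps ∧ c < x := by
  have hvals : x0 ∈ pvVals ps k := pvMem_vals.mpr hmem
  rw [pvGtGet, pvMaxFold_get? ps PySem.Dict.empty k, PySem.Dict.get?_empty]
  rcases h : pvVals ps k with _ | ⟨v, vs⟩
  · simp [h] at hvals
  · simp only [decide_eq_true_eq, pvFoldlMax_gt]
    constructor
    · rintro (hlt | ⟨x, hx, hlt⟩)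
      · exact ⟨v, pvMem_vals.mp (h ▸ List.mem_cons_self ..), hlt⟩
      · exact ⟨x, pvMem_vals.mp (h ▸ List.mem_cons_of_mem _ hx), hlt⟩
    · rintro ⟨x, hx, hlt⟩
      have : x ∈ v :: vs := h ▸ pvMem_vals.mpr hx
      rcases this with _ | hmem'
      · exact Or.inl hlt
      · exact Or.inr ⟨x, by assumption, hlt⟩

-- B's flag loop computes the four 'any' conditions
theorem pvStepB_eq (r c : Int) (fl : Bool × Bool × Bool × Bool) (b : List Int) :
    pvStepB r c fl b =
      (fl.1 || pvQ1 r c b, fl.2.1 || pvQ2 r c b, fl.2.2.1 || pvQ3 r c b, fl.2.2.2 || pvQ4 r c b) := by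
  obtain ⟨a, bb, u, dn⟩ := fl
  rcases b with _ | ⟨r2, _ | ⟨c2, _ | ⟨y, tl⟩⟩⟩ <;>
    simp only [pvStepB, pvQ1, pvQ2, pvQ3, pvQ4, Bool.or_false]
  by_cases hr : r2 = r <;> by_cases hc : c2 = c <;>
    by_cases h1 : c2 < c <;> by_cases h2 : c2 > c <;>
    by_cases h3 : r2 < r <;> by_cases h4 : r2 > r <;>
    first
      | omega
      | simp [hr, hc, h1, h2, h3, h4]

theorem pvCovered_eq_any (l : List (List Int)) (r c : Int) :
    pvCovered l r c =
      (l.any (pvQ1 r c) && l.any (pvQ2 r c) && l.any (pvQ3 r c) && l.any (pvQ4 r c)) := by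
  have key : ∀ (a b u dn : Bool),
      l.foldl (pvStepB r c) (a, b, u, dn)
      = (a || l.any (pvQ1 r c), b || l.any (pvQ2 r c), u || l.any (pvQ3 r c), dn || l.any (pvQ4 r c)) := by
    induction l with
    | nil => intro a b u dn; simp
    | cons x t ih =>
      intro a b u dn
      rw [List.foldl_cons, pvStepB_eq, ih]
      simp [Bool.or_assoc]
  unfold pvCovered
  simp only [key false false false false, Bool.false_or]

theorem pvAny_q1 {l : List (List Int)} {r c : Int} :
    l.any (pvQ1 r c) = true ↔ ∃ x, (r, x) ∈ l.filterMap pvPairOf ∧ x < c := by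
  rw [List.any_eq_true]
  constructor
  · rintro ⟨b, hb, hq⟩
    rcases b with _ | ⟨r2, _ | ⟨c2, _ | ⟨y, tl⟩⟩⟩ <;> simp [pvQ1] at hq
    obtain ⟨h1, h2⟩ := hq
    refine ⟨c2, List.mem_filterMap.mpr ⟨[r2, c2], hb, ?_⟩, h2⟩
    rw [pvPairOf_eq_some]; simp [h1]
  · rintro ⟨x, hx, hlt⟩
    obtain ⟨b, hb, hsome⟩ := List.mem_filterMap.mp hx
    refine ⟨b, hb, ?_⟩
    rw [pvPairOf_eq_some] at hsome
    subst hsome; simp [pvQ1, hlt]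

theorem pvAny_q2 {l : List (List Int)} {r c : Int} :
    l.any (pvQ2 r c) = true ↔ ∃ x, (r, x) ∈ l.filterMap pvPairOf ∧ c < x := by
  rw [List.any_eq_true]
  constructor
  · rintro ⟨b, hb, hq⟩
    rcases b with _ | ⟨r2, _ | ⟨c2, _ | ⟨y, tl⟩⟩⟩ <;> simp [pvQ2] at hq
    obtain ⟨h1, h2⟩ := hq
    refine ⟨c2, List.mem_filterMap.mpr ⟨[r2, c2], hb, ?_⟩, h2⟩
    rw [pvPairOf_eq_some]; simp [h1]
  · rintro ⟨x, hx, hlt⟩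
    obtain ⟨b, hb, hsome⟩ := List.mem_filterMap.mp hx
    refine ⟨b, hb, ?_⟩
    rw [pvPairOf_eq_some] at hsome
    subst hsome; simp [pvQ2, hlt]

theorem pvAny_q3 {l : List (List Int)} {r c : Int} :
    l.any (pvQ3 r c) = true ↔ ∃ x, (c, x) ∈ l.filterMap pvPairOf' ∧ x < r := by
  rw [List.any_eq_true]
  constructor
  · rintro ⟨b, hb, hq⟩
    rcases b with _ | ⟨r2, _ | ⟨c2, _ | ⟨y, tl⟩⟩⟩ <;> simp [pvQ3] at hq
    obtain ⟨h1, h2⟩ := hq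
    refine ⟨r2, List.mem_filterMap.mpr ⟨[r2, c2], hb, ?_⟩, h2⟩
    rw [pvPairOf'_eq_some]; simp [h1]
  · rintro ⟨x, hx, hlt⟩
    obtain ⟨b, hb, hsome⟩ := List.mem_filterMap.mp hx
    refine ⟨b, hb, ?_⟩
    rw [pvPairOf'_eq_some] at hsome
    subst hsome; simp [pvQ3, hlt]

theorem pvAny_q4 {l : List (List Int)} {r c : Int} :
    l.any (pvQ4 r c) = true ↔ ∃ x, (c, x) ∈ l.filterMap pvPairOf' ∧ r < x := by
  rw [List.any_eq_true]
  constructor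
  · rintro ⟨b, hb, hq⟩
    rcases b with _ | ⟨r2, _ | ⟨c2, _ | ⟨y, tl⟩⟩⟩ <;> simp [pvQ4] at hq
    obtain ⟨h1, h2⟩ := hq
    refine ⟨r2, List.mem_filterMap.mpr ⟨[r2, c2], hb, ?_⟩, h2⟩
    rw [pvPairOf'_eq_some]; simp [h1]
  · rintro ⟨x, hx, hlt⟩
    obtain ⟨b, hb, hsome⟩ := List.mem_filterMap.mp hx
    refine ⟨b, hb, ?_⟩
    rw [pvPairOf'_eq_some] at hsome
    subst hsome; simp [pvQ4, hlt]

theorem pvCond_eq (l : List (List Int)) (r c : Int) (hmem : [r, c] ∈ l) :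
    (pvLtGet (pvMinFold (l.filterMap pvPairOf) PySem.Dict.empty) r c &&
     pvGtGet (pvMaxFold (l.filterMap pvPairOf) PySem.Dict.empty) r c &&
     pvLtGet (pvMinFold (l.filterMap pvPairOf') PySem.Dict.empty) c r &&
     pvGtGet (pvMaxFold (l.filterMap pvPairOf') PySem.Dict.empty) c r)
    = pvCovered l r c := by
  have hp : (r, c) ∈ l.filterMap pvPairOf :=
    List.mem_filterMap.mpr ⟨[r, c], hmem, by rw [pvPairOf_eq_some]⟩
  have hp' : (c, r) ∈ l.filterMap pvPairOf' :=
    List.mem_filterMap.mpr ⟨[r, c], hmem, by rw [pvPairOf'_eq_some]⟩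
  rw [pvCovered_eq_any]
  have e1 : pvLtGet (pvMinFold (l.filterMap pvPairOf) PySem.Dict.empty) r c = l.any (pvQ1 r c) := by
    rw [Bool.eq_iff_iff, pvLtGet_minFold hp, pvAny_q1]
  have e2 : pvGtGet (pvMaxFold (l.filterMap pvPairOf) PySem.Dict.empty) r c = l.any (pvQ2 r c) := by
    rw [Bool.eq_iff_iff, pvGtGet_maxFold hp, pvAny_q2]
  have e3 : pvLtGet (pvMinFold (l.filterMap pvPairOf') PySem.Dict.empty) c r = l.any (pvQ3 r c) := by
    rw [Bool.eq_iff_iff, pvLtGet_minFold hp', pvAny_q3]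
  have e4 : pvGtGet (pvMaxFold (l.filterMap pvPairOf') PySem.Dict.empty) c r = l.any (pvQ4 r c) := by
    rw [Bool.eq_iff_iff, pvGtGet_maxFold hp', pvAny_q4]
  rw [e1, e2, e3, e4]

-- ===== VERDICT (by name: the statement is the Claim_ definition above) =====
theorem countCoveredBuildings_spec : Claim_equal_countCoveredBuildings := by
  intro n l _ hpre
  unfold Spec_countCoveredBuildings countCoveredBuildings countCoveredBuildings_alt
  simp only [pvPass1_eq]
  apply PySem.List.foldl_congr_mem
  intro acc b hb
  have hlen := hpre b hb
  rcases b with _ | ⟨r, _ | ⟨c, _ | ⟨x, tl⟩⟩⟩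
  · simp at hlen
  · simp at hlen
  · simp only [pvCond_eq l r c hb]
  · simp at hlen
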